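-- pv_equiv track=rewrite | github.com/Macorov/Python-practice | untitled90.py | num_key_strokes
-- ===== SOURCE A (Python) =====
-- def num_key_strokes(text):
--     count = 0
--     lst = [";", ",", ".", "/", "=", "-"]
--     text = list(text)
--
--     for ch in text:
--
--         if ch.isdigit():
--
--             count += 1
--         elif(ch.isalpha()):
--             if ch.isupper():
--
--                 count += 2
--             else:
--                 count += 1
--         elif ch == " ":
--
--             count += 1
--         elif ch in lst:
--             count += 1
--         else :
--             count += 2
--     return count
-- ===== SOURCE B (Python) =====
-- def num_key_strokes(text):
--     light = "0123456789abcdefghijklmnopqrstuvwxyz ;,./=-"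
--     freq = {}
--     for ch in text:
--         freq[ch] = freq.get(ch, 0) + 1
--     return sum(n * (1 if ch in light else 2) for ch, n in freq.items())
-- ===== Notes on version B (the rewrite author's own statement) =====
-- stated objective: alternative
-- what changed: B builds a character-frequency dictionary in one pass and then sums count*cost over the distinct characters, with cost read off a light-character table string instead of A's isdigit/isalpha/isupper branch ladder evaluated per character.
import Mathlib
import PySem

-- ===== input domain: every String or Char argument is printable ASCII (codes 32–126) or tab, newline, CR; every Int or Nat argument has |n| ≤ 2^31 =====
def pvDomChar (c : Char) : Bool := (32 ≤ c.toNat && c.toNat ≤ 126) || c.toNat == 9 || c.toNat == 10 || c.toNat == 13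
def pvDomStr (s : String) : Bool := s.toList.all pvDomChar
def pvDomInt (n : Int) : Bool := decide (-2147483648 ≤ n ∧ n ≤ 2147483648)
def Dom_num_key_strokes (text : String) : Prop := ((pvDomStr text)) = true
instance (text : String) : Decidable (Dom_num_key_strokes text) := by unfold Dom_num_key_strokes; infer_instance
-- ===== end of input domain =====

-- B replaces A's per-character branch-ladder accumulation by a character histogram (dict)
-- summed as count × cost over the distinct characters, cost read off a light-character table.


-- ===== PORT A =====
-- A's per-character if/elif ladder (ch in lst ported as Char membership; all chars are length-1 strings)
def nksCost (ch : Char) : Int :=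
  if PySem.Chars.isdigit ch then 1
  else if PySem.Chars.isalpha ch then (if PySem.Chars.isupper ch then 2 else 1)
  else if ch == ' ' then 1
  else if [';', ',', '.', '/', '=', '-'].contains ch then 1
  else 2

def num_key_strokes (text : String) : Int :=
  text.toList.foldl (fun count ch => count + nksCost ch) 0

-- ===== PORT B =====
-- B's light-character table ('ch in light' on a 1-char string is membership of the char)
def nksLight : List Char := "0123456789abcdefghijklmnopqrstuvwxyz ;,./=-".toList

def num_key_strokes_alt (text : String) : Int :=
  let freq := text.toList.foldl (fun d ch => d.insert ch (d.getD ch 0 + 1)) PySem.Dict.empty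
  (freq.items.map (fun p => p.2 * (if nksLight.contains p.1 then 1 else 2))).sum

-- ===== PRECONDITION & SPEC =====
def Spec_num_key_strokes (text : String) (out : Int) : Prop := out = num_key_strokes_alt text
instance (text : String) (out : Int) : Decidable (Spec_num_key_strokes text out) := by unfold Spec_num_key_strokes; infer_instance

-- ===== CLAIM (what is proved, stated in full; the proofs are below) =====
def Claim_equal_num_key_strokes : Prop := ∀ (text : String), Dom_num_key_strokes text → Spec_num_key_strokes text (num_key_strokes text)

-- ===== LEMMAS AND PROOFS =====

-- the light-string literal as a character list
lemma nksLight_eq : nksLight = ['0','1','2','3','4','5','6','7','8','9','a','b','c','d','e','f','g','h','i','j','k','l','m','n','o','p','q','r','s','t','u','v','w','x','y','z',' ',';',',','.','/','=','-'] := by rfl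

-- A's branch ladder computes exactly B's table cost (the PySem predicates are ASCII-exact)
lemma nksCost_eq_light (c : Char) :
    nksCost c = (if nksLight.contains c then 1 else 2 : Int) := by
  unfold nksCost
  rw [nksLight_eq]
  simp only [PySem.Chars.isdigit, PySem.Chars.isalpha, PySem.Chars.isupper, PySem.Chars.islower,
    Bool.and_eq_true, Bool.or_eq_true, decide_eq_true_eq, List.contains_eq_mem, List.mem_cons,
    List.not_mem_nil, or_false, beq_iff_eq, Char.le_def, Char.ext_iff, UInt32.le_iff_toNat_le,
    UInt32.ext_iff]
  split_ifs <;> simp_all <;> omega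

lemma sum_map_indicator {f : Char → Int} (s : List Char) (a : Char)
    (hn : s.Nodup) (ha : a ∈ s) :
    (s.map (fun k => (if k = a then f k else 0))).sum = f a := by
  induction s with
  | nil => cases ha
  | cons x t ih =>
      obtain ⟨hx, hnt⟩ := List.nodup_cons.mp hn
      rcases List.mem_cons.mp ha with h | h
      · subst h
        have hz : (List.map (fun k => if k = a then f k else 0) t).sum = 0 := by
          apply List.sum_eq_zero
          intro y hy
          rcases List.mem_map.mp hy with ⟨k, hk, rfl⟩
          have hk' : k ≠ a := fun e => hx (e ▸ hk)
          simp [hk']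
        simp [hz]
      · have hxa : x ≠ a := fun e => hx (e ▸ h)
        simp [hxa, ih hnt h]

lemma sum_count_mul (l : List Char) (s : List Char) (f : Char → Int)
    (hn : s.Nodup) (hsub : ∀ x ∈ l, x ∈ s) :
    (s.map (fun k => (l.count k : Int) * f k)).sum = (l.map f).sum := by
  induction l with
  | nil => simp
  | cons a t ih =>
      have ha : a ∈ s := hsub a (List.mem_cons_self ..)
      have ht : ∀ x ∈ t, x ∈ s := fun x hx => hsub x (List.mem_cons_of_mem _ hx)
      have step : ∀ k, ((a :: t).count k : Int) * f k
          = (t.count k : Int) * f k + (if k = a then f k else 0) := by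
        intro k
        by_cases h : a = k <;> simp [h, eq_comm] <;> ring
      calc (s.map (fun k => ((a :: t).count k : Int) * f k)).sum
          = (s.map (fun k => (t.count k : Int) * f k + (if k = a then f k else 0))).sum := by
            exact congrArg List.sum (List.map_congr_left (fun k _ => step k))
        _ = (s.map (fun k => (t.count k : Int) * f k)).sum
            + (s.map (fun k => (if k = a then f k else 0))).sum := by
            rw [← List.sum_map_add]
        _ = (t.map f).sum + f a := by rw [ih ht, sum_map_indicator s a hn ha]
        _ = ((a :: t).map f).sum := by simp; ring

-- ===== VERDICT (by name: the statement is the Claim_ definition above) =====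
theorem num_key_strokes_spec : Claim_equal_num_key_strokes := by
  intro text hdom
  unfold Spec_num_key_strokes num_key_strokes num_key_strokes_alt
  rw [PySem.List.foldl_add]
  simp only [PySem.Dict.foldl_insert_getD_add_one_eq_counter, PySem.Dict.items_counter,
    List.map_map]
  have := sum_count_mul text.toList (PySem.Set.ofList text.toList)
    (fun k => (if nksLight.contains k then 1 else 2 : Int))
    (PySem.Set.nodup_ofList _) (fun x hx => (PySem.Set.mem_ofList _ _).mpr hx)
  simp only [Function.comp_def] at this ⊢
  rw [this]
  rw [List.map_congr_left (fun c hc => (nksCost_eq_light c).symm)]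
  simp
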